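-- pv_equiv track=rewrite | github.com/medizininformatik-initiative/GeMTeX | surrogator/Surrogator/Substitution/CasManagement/__init__.py | get_pattern
-- ===== SOURCE A (Python) =====
-- def get_pattern(name_string):
--
--     """
--     get pattern from name_string
--
--     Parameters
--     ----------
--     name_string : string
--
--     Returns
--     -------
--     string
--     """
--
--     pattern_chars = ['L', 'U', 'D']
--
--     def handle_last_pattern(_c, _last_pattern, _cnt_last_pattern, _pattern):
--
--         """
--         handle last pattern as part of handle pattern
--
--         Parameters
--         ----------
--         _c : basestring
--         _last_pattern : basestring
--         _cnt_last_pattern : basestring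
--         _pattern : basestring
--
--         Returns
--         -------
--         string
--         """
--
--         if _last_pattern is None:  # Configuration
--             _cnt_last_pattern = 1
--
--         elif _last_pattern == _c:  # same
--             _cnt_last_pattern = _cnt_last_pattern + 1
--
--         elif _last_pattern not in pattern_chars:
--             _cnt_last_pattern = 1
--
--         else:  # change
--             _pattern = _pattern + _last_pattern + str(_cnt_last_pattern)
--             _cnt_last_pattern = 1
--
--         _last_pattern = _c
--
--         return _pattern, _cnt_last_pattern, _last_pattern
--
--     p = name_string
--
--     last_pattern = None
--     cnt_last_pattern = 0
--     pattern = ''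
--
--     for c in p:
--
--         if c.isupper():
--             pattern, cnt_last_pattern, last_pattern = handle_last_pattern(
--                 _c='U',
--                 _last_pattern=last_pattern,
--                 _cnt_last_pattern=cnt_last_pattern,
--                 _pattern=pattern
--             )
--
--         elif c.islower():
--             pattern, cnt_last_pattern, last_pattern = handle_last_pattern(
--                 _c='L',
--                 _last_pattern=last_pattern,
--                 _cnt_last_pattern=cnt_last_pattern,
--                 _pattern=pattern
--             )
--         elif c.isnumeric():
--             pattern, cnt_last_pattern, last_pattern = handle_last_pattern(
--                 _c='D',
--                 _last_pattern=last_pattern,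
--                 _cnt_last_pattern=cnt_last_pattern,
--                 _pattern=pattern
--             )
--         else:
--
--             if last_pattern is None:  # Configuration
--                 cnt_last_pattern = 1
--
--             if last_pattern in pattern_chars:
--                 pattern = pattern + last_pattern + str(cnt_last_pattern) + c
--                 cnt_last_pattern = 1
--             else:
--                 pattern = pattern + c
--                 cnt_last_pattern = 1
--
--             last_pattern = c
--
--     if last_pattern in pattern_chars:
--         pattern = pattern + last_pattern + str(cnt_last_pattern)
--
--     return pattern.replace(' ', '-')
-- ===== SOURCE B (Python) =====
-- from itertools import groupby
--
-- def get_pattern(name_string):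
--     tokens = ['U' if c.isupper() else 'L' if c.islower() else 'D' if c.isnumeric() else c
--               for c in name_string]
--     parts = []
--     for tok, grp in groupby(tokens):
--         n = sum(1 for _ in grp)
--         if tok in ('L', 'U', 'D'):
--             parts.append(tok + str(n))
--         else:
--             parts.append(tok * n)
--     return ''.join(parts).replace(' ', '-')
-- ===== Notes on version B (the rewrite author's own statement) =====
-- stated objective: idiomatic
-- what changed: A's delayed-emit state machine (carrying last-pattern/count/partial-output through a helper) is replaced by a two-phase pass: map each char to its class token (U/L/D/literal), group maximal runs with itertools.groupby, and render class runs as letter+count and literal runs verbatim. (constant-factor win: groupby's C-level run grouping replaces a per-char Python helper call and repeated string concatenation).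
import Mathlib
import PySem

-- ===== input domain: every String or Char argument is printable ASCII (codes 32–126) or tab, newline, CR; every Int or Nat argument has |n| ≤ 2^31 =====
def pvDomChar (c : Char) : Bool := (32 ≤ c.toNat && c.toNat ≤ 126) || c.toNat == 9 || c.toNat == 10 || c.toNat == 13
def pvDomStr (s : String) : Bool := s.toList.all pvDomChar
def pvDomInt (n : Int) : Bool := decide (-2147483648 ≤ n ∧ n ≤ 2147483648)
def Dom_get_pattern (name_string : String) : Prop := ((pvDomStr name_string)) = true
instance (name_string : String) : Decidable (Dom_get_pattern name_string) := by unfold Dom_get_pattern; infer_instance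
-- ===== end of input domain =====

-- B replaces A's delayed-emit state machine by classify-then-groupby run-length rendering (objective: idiomatic).

-- ===== PORT A =====
-- pattern_chars = ['L', 'U', 'D']
def pvPatternChars : List Char := ['L', 'U', 'D']

-- handle_last_pattern; state tuple returned in Python's order (pattern, cnt, last).
-- c.isnumeric() is ported as PySem.Chars.isdigit, exact on the printable-ASCII domain.
def pvHandleLast (c : Char) (last : Option Char) (cnt : Int) (pat : List Char) :
    List Char × Int × Option Char :=
  match last with
  | none => (pat, 1, some c)
  | some l =>
    if l = c then (pat, cnt + 1, some c)
    else if pvPatternChars.contains l = false then (pat, 1, some c)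
    else (pat ++ [l] ++ PySem.Int.toChars cnt, 1, some c)

def pvStepA (st : List Char × Int × Option Char) (c : Char) :
    List Char × Int × Option Char :=
  let (pat, cnt, last) := st
  if PySem.Chars.isupper c then pvHandleLast 'U' last cnt pat
  else if PySem.Chars.islower c then pvHandleLast 'L' last cnt pat
  else if PySem.Chars.isdigit c then pvHandleLast 'D' last cnt pat
  else
    -- Python's `if last_pattern is None: cnt_last_pattern = 1` is dead here
    -- (both following branches reset cnt to 1 and only use cnt when last ≠ None); kept as cnt'.
    let cnt' := if last = none then (1 : Int) else cnt
    match last with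
    | some l =>
      if pvPatternChars.contains l then
        (pat ++ [l] ++ PySem.Int.toChars cnt' ++ [c], 1, some c)
      else (pat ++ [c], 1, some c)
    | none => (pat ++ [c], 1, some c)

def pvFinishA (st : List Char × Int × Option Char) : List Char :=
  let (pat, cnt, last) := st
  match last with
  | some l => if pvPatternChars.contains l then pat ++ [l] ++ PySem.Int.toChars cnt else pat
  | none => pat

def get_pattern (name_string : String) : String :=
  String.mk (PySem.Chars.replace
    (pvFinishA (name_string.toList.foldl pvStepA ([], 0, none))) [' '] ['-'])

-- ===== PORT B =====
-- 'U' if c.isupper() else 'L' if c.islower() else 'D' if c.isnumeric() else c  (isnumeric = isdigit on ASCII)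
def pvClassify (c : Char) : Char :=
  if PySem.Chars.isupper c then 'U'
  else if PySem.Chars.islower c then 'L'
  else if PySem.Chars.isdigit c then 'D'
  else c

-- itertools.groupby (identity key) on a char list: maximal runs with their lengths.
def pvGroupby : List Char → List (Char × Nat)
  | [] => []
  | t :: ts =>
    (t, 1 + (ts.takeWhile (· == t)).length) :: pvGroupby (ts.dropWhile (· == t))
termination_by l => l.length
decreasing_by
  simpa using Nat.lt_succ_of_le (List.length_dropWhile_le (· == t) ts)

def pvPart (g : Char × Nat) : List Char :=
  if ['L', 'U', 'D'].contains g.1 then g.1 :: PySem.Int.toChars (g.2 : Int)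
  else List.replicate g.2 g.1

def get_pattern_alt (name_string : String) : String :=
  String.mk (PySem.Chars.replace
    (((pvGroupby (name_string.toList.map pvClassify)).map pvPart).flatten) [' '] ['-'])

-- ===== PRECONDITION & SPEC =====
def Spec_get_pattern (name_string : String) (out : String) : Prop := out = get_pattern_alt name_string
instance (name_string : String) (out : String) : Decidable (Spec_get_pattern name_string out) := by unfold Spec_get_pattern; infer_instance

-- ===== CLAIM (what is proved, stated in full; the proofs are below) =====
def Claim_equal_get_pattern : Prop := ∀ (name_string : String), Dom_get_pattern name_string → Spec_get_pattern name_string (get_pattern name_string)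

-- ===== LEMMAS AND PROOFS =====

-- B's rendering of a token list
def pvRender (ts : List Char) : List Char := ((pvGroupby ts).map pvPart).flatten

lemma pvRender_cons (t : Char) (ts : List Char) :
    pvRender (t :: ts) =
      (if pvPatternChars.contains t then
        t :: PySem.Int.toChars ((1 + (ts.takeWhile (· == t)).length : Nat) : Int)
       else List.replicate (1 + (ts.takeWhile (· == t)).length) t)
      ++ pvRender (ts.dropWhile (· == t)) := by
  rw [pvRender, pvGroupby]
  simp [pvPart, pvPatternChars, pvRender]

lemma pvTakeWhile_replicate (t : Char) (l : List Char) :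
    l.takeWhile (· == t) = List.replicate (l.takeWhile (· == t)).length t := by
  induction l with
  | nil => simp
  | cons c l ih =>
    by_cases h : c = t
    · subst h; simpa [List.takeWhile_cons, List.replicate_succ] using ih
    · simp [h]

lemma pvTakeWhile_dropWhile (p : Char → Bool) (l : List Char) :
    (l.dropWhile p).takeWhile p = [] := by
  induction l with
  | nil => simp
  | cons c l ih => by_cases h : p c <;> simp [h, ih]

lemma pvDropWhile_dropWhile (p : Char → Bool) (l : List Char) :
    (l.dropWhile p).dropWhile p = l.dropWhile p := by
  induction l with
  | nil => simp
  | cons c l ih => by_cases h : p c <;> simp [h, ih]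

-- absorption: a non-class token is rendered verbatim in front
lemma pvRender_other_cons (c : Char) (ts : List Char)
    (h : pvPatternChars.contains c = false) :
    pvRender (c :: ts) = c :: pvRender ts := by
  rw [pvRender_cons, h, if_neg (by simp)]
  have hts : ts.takeWhile (· == c) ++ ts.dropWhile (· == c) = ts :=
    List.takeWhile_append_dropWhile
  have hrep := pvTakeWhile_replicate c ts
  have key : pvRender ts = List.replicate (ts.takeWhile (· == c)).length c
      ++ pvRender (ts.dropWhile (· == c)) := by
    cases k : (ts.takeWhile (· == c)).length with
    | zero =>
      have hnil : ts.takeWhile (· == c) = [] := List.eq_nil_of_length_eq_zero k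
      simp only [hnil, List.nil_append] at hts
      simp [hts]
    | succ m =>
      have hts' : ts = c :: (List.replicate m c ++ ts.dropWhile (· == c)) := by
        conv_lhs => rw [← hts, hrep, k, List.replicate_succ]
        simp
      have hpos : ∀ x ∈ List.replicate m c, ((x == c) : Bool) = true := by
        intro x hx; simp [List.eq_of_mem_replicate hx]
      rw [hts', pvRender_cons, h, if_neg (by simp),
        List.takeWhile_append_of_pos hpos, List.dropWhile_append_of_pos hpos,
        pvTakeWhile_dropWhile, pvDropWhile_dropWhile]
      simp [List.replicate_succ, Nat.add_comm, pvDropWhile_dropWhile]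
  rw [key, Nat.add_comm, List.replicate_succ]
  simp

-- the token-level step: A's per-char step depends only on the char's class token
def pvStepTok (st : List Char × Int × Option Char) (t : Char) :
    List Char × Int × Option Char :=
  let (pat, cnt, last) := st
  if pvPatternChars.contains t then pvHandleLast t last cnt pat
  else
    match last with
    | some l =>
      if pvPatternChars.contains l then
        (pat ++ [l] ++ PySem.Int.toChars (if last = none then (1 : Int) else cnt) ++ [t], 1, some t)
      else (pat ++ [t], 1, some t)
    | none => (pat ++ [t], 1, some t)

lemma pvStepA_eq_token (st : List Char × Int × Option Char) (c : Char) :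
    pvStepA st c = pvStepTok st (pvClassify c) := by
  obtain ⟨pat, cnt, last⟩ := st
  unfold pvClassify
  by_cases h1 : PySem.Chars.isupper c = true
  · simp [pvStepA, pvStepTok, h1, pvPatternChars]
  · by_cases h2 : PySem.Chars.islower c = true
    · simp [pvStepA, pvStepTok, h1, h2, pvPatternChars]
    · by_cases h3 : PySem.Chars.isdigit c = true
      · simp [pvStepA, pvStepTok, h1, h2, h3, pvPatternChars]
      · have hL : c ≠ 'L' := fun e => h1 (by rw [e]; decide)
        have hU : c ≠ 'U' := fun e => h1 (by rw [e]; decide)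
        have hD : c ≠ 'D' := fun e => h1 (by rw [e]; decide)
        simp [pvStepA, pvStepTok, h1, h2, h3, pvPatternChars, hL, hU, hD]

lemma pvFoldl_classify (l : List Char) : ∀ st,
    l.foldl pvStepA st = (l.map pvClassify).foldl pvStepTok st := by
  induction l with
  | nil => intro st; rfl
  | cons c l ih => intro st; simp only [List.foldl_cons, List.map_cons, ih, pvStepA_eq_token]

-- the main invariant, both shapes at once, by strong induction on length
lemma pvToChars_congr {a b : Int} (h : a = b) :
    PySem.Int.toChars a = PySem.Int.toChars b := by rw [h]

lemma pvMain (n : Nat) : ∀ ts : List Char, ts.length ≤ n →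
    (∀ pat cnt last, (last = none ∨ ∃ l, last = some l ∧ pvPatternChars.contains l = false) →
      pvFinishA (ts.foldl pvStepTok (pat, cnt, last)) = pat ++ pvRender ts) ∧
    (∀ pat cnt t, pvPatternChars.contains t = true →
      pvFinishA (ts.foldl pvStepTok (pat, cnt, some t)) =
        pat ++ [t] ++ PySem.Int.toChars (cnt + (ts.takeWhile (· == t)).length)
          ++ pvRender (ts.dropWhile (· == t))) := by
  induction n with
  | zero =>
    intro ts hts
    have : ts = [] := List.eq_nil_of_length_eq_zero (Nat.le_zero.mp hts)
    subst this
    constructor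
    · rintro pat cnt last (rfl | ⟨l, rfl, hl⟩)
      · simp [pvFinishA, pvRender, pvGroupby]
      · have hl' : l ∉ pvPatternChars := by simpa using hl
        simp [pvFinishA, pvRender, pvGroupby, hl']
    · intro pat cnt t ht
      have ht' : t ∈ pvPatternChars := by simpa using ht
      simp [pvFinishA, pvRender, pvGroupby, ht']
  | succ n ih =>
    intro ts hts
    match ts, hts with
    | [], _ =>
      constructor
      · rintro pat cnt last (rfl | ⟨l, rfl, hl⟩)
        · simp [pvFinishA, pvRender, pvGroupby]
        · have hl' : l ∉ pvPatternChars := by simpa using hl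
          simp [pvFinishA, pvRender, pvGroupby, hl']
      · intro pat cnt t ht
        have ht' : t ∈ pvPatternChars := by simpa using ht
        simp [pvFinishA, pvRender, pvGroupby, ht']
    | c :: ts', hts =>
      have hlen : ts'.length ≤ n := by simpa using Nat.succ_le_succ_iff.mp (by simpa using hts)
      constructor
      · rintro pat cnt last hlast
        by_cases hc : pvPatternChars.contains c = true
        · have hcm : c ∈ pvPatternChars := by simpa using hc
          have hstep : pvStepTok (pat, cnt, last) c = (pat, 1, some c) := by
            rcases hlast with rfl | ⟨l, rfl, hl⟩
            · simp [pvStepTok, pvHandleLast, hcm]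
            · have hlm : l ∉ pvPatternChars := by simpa using hl
              have hlc : l ≠ c := fun e => by rw [e] at hl; rw [hl] at hc; cases hc
              simp [pvStepTok, pvHandleLast, hcm, hlm, hlc]
          rw [List.foldl_cons, hstep, (ih ts' hlen).2 pat 1 c hc, pvRender_cons, hc, if_pos rfl]
          have : ((1 : Int) + ((ts'.takeWhile (· == c)).length : Int)) =
              (((1 + (ts'.takeWhile (· == c)).length : Nat)) : Int) := by push_cast; ring
          rw [this]
          simp
        · have hc' : pvPatternChars.contains c = false := by simpa using hc
          have hcm' : c ∉ pvPatternChars := by simpa using hc'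
          have hstep : pvStepTok (pat, cnt, last) c = (pat ++ [c], 1, some c) := by
            rcases hlast with rfl | ⟨l, rfl, hl⟩
            · simp [pvStepTok, hcm']
            · have hlm : l ∉ pvPatternChars := by simpa using hl
              simp [pvStepTok, hcm', hlm]
          rw [List.foldl_cons, hstep,
            (ih ts' hlen).1 (pat ++ [c]) 1 (some c) (Or.inr ⟨c, rfl, hc'⟩),
            pvRender_other_cons c ts' hc']
          simp
      · intro pat cnt t ht
        have htm : t ∈ pvPatternChars := by simpa using ht
        by_cases hc : pvPatternChars.contains c = true
        · have hcm : c ∈ pvPatternChars := by simpa using hc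
          by_cases hct : t = c
          · subst hct
            have hstep : pvStepTok (pat, cnt, some t) t = (pat, cnt + 1, some t) := by
              simp [pvStepTok, pvHandleLast, htm]
            rw [List.foldl_cons, hstep, (ih ts' hlen).2 pat (cnt + 1) t ht]
            have harg : cnt + 1 + ((ts'.takeWhile (· == t)).length : Int) =
                cnt + (((t :: ts').takeWhile (· == t)).length : Int) := by
              simp [List.takeWhile_cons]
              push_cast
              ring
            rw [pvToChars_congr harg]
            simp
          · have hne : ((c == t) : Bool) = false := beq_eq_false_iff_ne.mpr (fun e => hct e.symm)
            have hstep : pvStepTok (pat, cnt, some t) c =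
                (pat ++ [t] ++ PySem.Int.toChars cnt, 1, some c) := by
              simp [pvStepTok, pvHandleLast, hcm, htm, hct]
            rw [List.foldl_cons, hstep, (ih ts' hlen).2 _ 1 c hc]
            simp only [List.takeWhile_cons, List.dropWhile_cons, hne, Bool.false_eq_true,
              if_false, List.length_nil, Nat.cast_zero, add_zero]
            rw [pvRender_cons, hc, if_pos rfl]
            simp [Nat.cast_add]
        · have hc' : pvPatternChars.contains c = false := by simpa using hc
          have hcm' : c ∉ pvPatternChars := by simpa using hc'
          have hct : ((c == t) : Bool) = false := by
            have : c ≠ t := fun e => by rw [e] at hc'; rw [ht] at hc'; cases hc'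
            simp [this]
          have hstep : pvStepTok (pat, cnt, some t) c =
              (pat ++ [t] ++ PySem.Int.toChars cnt ++ [c], 1, some c) := by
            simp [pvStepTok, hcm', htm]
          rw [List.foldl_cons, hstep,
            (ih ts' hlen).1 _ 1 (some c) (Or.inr ⟨c, rfl, hc'⟩)]
          simp only [List.takeWhile_cons, List.dropWhile_cons, hct, Bool.false_eq_true,
            if_false, List.length_nil, Nat.cast_zero, add_zero]
          rw [pvRender_other_cons c ts' hc']
          simp

-- ===== VERDICT (by name: the statement is the Claim_ definition above) =====
theorem get_pattern_spec : Claim_equal_get_pattern := by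
  intro s _
  unfold Spec_get_pattern get_pattern get_pattern_alt
  rw [pvFoldl_classify,
    (pvMain (s.toList.map pvClassify).length (s.toList.map pvClassify) le_rfl).1
      [] 0 none (Or.inl rfl)]
  simp [pvRender]
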